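-- pv_equiv track=rewrite | github.com/diothor/dcp-python | problems/numbers/problem_265.py | bonuses
-- ===== SOURCE A (Python) =====
-- def bonuses(coders: list) -> list:
--     size = len(coders)
--     rewards = [1] * size
--
--     for index in range(1, size):
--         if coders[index] > coders[index - 1]:
--             rewards[index] = rewards[index - 1] + 1
--
--     for index in range(size - 2, -1, -1):
--         if coders[index] > coders[index + 1]:
--             rewards[index] = max(rewards[index], rewards[index + 1] + 1)
--
--     return rewards
-- ===== SOURCE B (Python) =====
-- def bonuses(coders: list) -> list:
--     # Run segmentation: one forward sweep over maximal strictly-increasing then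
--     # strictly-decreasing runs; each whole segment's rewards are emitted at once
--     # as ranges, the peak getting max(up_len, down_len).
--     n = len(coders)
--     res = []
--     i = 0
--     while i < n:
--         j = i
--         while j + 1 < n and coders[j + 1] > coders[j]:
--             j += 1
--         k = j
--         while k + 1 < n and coders[k + 1] < coders[k]:
--             k += 1
--         up = j - i + 1
--         down = k - j + 1
--         seg = list(range(1, up)) + [max(up, down)] + list(range(down - 1, 0, -1))
--         res.extend(seg[len(res) - i:])
--         i = k if k > j else k + 1
--     return res
-- ===== Notes on version B (the rewrite author's own statement) =====
-- stated objective: alternative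
-- what changed: Replaces A's two elementwise passes over a mutated rewards array by a single forward sweep that segments the input into maximal strictly-increasing then strictly-decreasing runs and emits each whole segment's rewards at once as ranges 1..up-1, max(up,down), down-1..1.
import Mathlib
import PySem

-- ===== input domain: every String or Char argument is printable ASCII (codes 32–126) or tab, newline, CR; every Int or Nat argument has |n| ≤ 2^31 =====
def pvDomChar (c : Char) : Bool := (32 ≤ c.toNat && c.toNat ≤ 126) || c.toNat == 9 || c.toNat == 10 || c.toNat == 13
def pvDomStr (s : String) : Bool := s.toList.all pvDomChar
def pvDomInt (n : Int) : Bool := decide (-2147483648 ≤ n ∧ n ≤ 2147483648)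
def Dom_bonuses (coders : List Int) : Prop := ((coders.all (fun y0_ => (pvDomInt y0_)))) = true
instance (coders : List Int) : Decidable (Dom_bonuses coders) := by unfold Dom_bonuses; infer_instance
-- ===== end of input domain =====

-- B differs from A by algorithmic decomposition: one sweep over maximal monotone runs,
-- emitting each segment's rewards wholesale, instead of A's two elementwise passes
-- mutating a rewards array (objective: alternative).

-- ===== PORT A =====
def bonuses (coders : List Int) : List Int :=
  let size : Int := coders.length
  let rewards : List Int := List.replicate coders.length 1
  let rewards1 := (PySem.List.pyRange 1 size 1).foldl (fun r i =>
      if PySem.List.pyGetD coders i 0 > PySem.List.pyGetD coders (i - 1) 0 then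
        PySem.List.pySetD r i (PySem.List.pyGetD r (i - 1) 0 + 1)
      else r) rewards
  let rewards2 := (PySem.List.pyRange (size - 2) (-1) (-1)).foldl (fun r i =>
      if PySem.List.pyGetD coders i 0 > PySem.List.pyGetD coders (i + 1) 0 then
        PySem.List.pySetD r i (max (PySem.List.pyGetD r i 0) (PySem.List.pyGetD r (i + 1) 0 + 1))
      else r) rewards1
  rewards2

-- ===== PORT B =====
-- inner while loop: end of the maximal strictly-increasing run starting at j
-- (fuel = enough iterations; the loop advances j and needs j + 1 < length, so
--  c.length - j iterations always suffice — the guard only makes it total)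
def findUpF (c : List Int) (fuel j : Nat) : Nat :=
  match fuel with
  | 0 => j
  | fuel + 1 =>
    if j + 1 < c.length ∧ c.getD (j + 1) 0 > c.getD j 0 then findUpF c fuel (j + 1) else j

def findUp (c : List Int) (j : Nat) : Nat := findUpF c (c.length - j) j

-- inner while loop: end of the maximal strictly-decreasing run starting at j
def findDownF (c : List Int) (fuel j : Nat) : Nat :=
  match fuel with
  | 0 => j
  | fuel + 1 =>
    if j + 1 < c.length ∧ c.getD (j + 1) 0 < c.getD j 0 then findDownF c fuel (j + 1) else j

def findDown (c : List Int) (j : Nat) : Nat := findDownF c (c.length - j) j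

-- outer while loop of B (i strictly increases, so c.length + 1 iterations suffice)
def segLoopF (c : List Int) (fuel : Nat) (i : Nat) (res : List Int) : List Int :=
  match fuel with
  | 0 => res
  | fuel + 1 =>
    if i < c.length then
      let j := findUp c i
      let k := findDown c j
      let up : Int := (j : Int) - (i : Int) + 1
      let down : Int := (k : Int) - (j : Int) + 1
      let seg := PySem.List.pyRange 1 up 1 ++ [max up down] ++ PySem.List.pyRange (down - 1) 0 (-1)
      let res' := res ++ PySem.List.slice seg (some ((res.length : Int) - (i : Int))) none
      segLoopF c fuel (if k > j then k else k + 1) res'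
    else res

def bonuses_alt (coders : List Int) : List Int := segLoopF coders (coders.length + 1) 0 []

-- ===== PRECONDITION & SPEC =====
def Spec_bonuses (coders : List Int) (out : List Int) : Prop := out = bonuses_alt coders
instance (coders : List Int) (out : List Int) : Decidable (Spec_bonuses coders out) := by unfold Spec_bonuses; infer_instance

-- ===== CLAIM (what is proved, stated in full; the proofs are below) =====
def Claim_equal_bonuses : Prop := ∀ (coders : List Int), Dom_bonuses coders → Spec_bonuses coders (bonuses coders)

-- ===== LEMMAS AND PROOFS =====

-- upF c i: length of the maximal strictly-increasing run of c ending at i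
def upF (c : List Int) : Nat → Int
  | 0 => 1
  | i + 1 => if c.getD (i + 1) 0 > c.getD i 0 then upF c i + 1 else 1

-- downF c i: length of the maximal strictly-decreasing run of c starting at i
def downF (c : List Int) (i : Nat) : Int :=
  if h : i + 1 < c.length then
    if c.getD i 0 > c.getD (i + 1) 0 then downF c (i + 1) + 1 else 1
  else 1
termination_by c.length - i
decreasing_by omega

lemma upF_pos (c : List Int) (i : Nat) : 1 ≤ upF c i := by
  cases i with
  | zero => simp [upF]
  | succ i => unfold upF; split <;> [have := upF_pos c i; skip] <;> omega

lemma downF_pos (c : List Int) (i : Nat) : 1 ≤ downF c i := by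
  unfold downF
  split
  · split
    · have := downF_pos c (i + 1); omega
    · omega
  · omega
termination_by c.length - i
decreasing_by omega

lemma getD_set (r : List Int) (k j : Nat) (v : Int) (hk : k < r.length) :
    (r.set k v).getD j 0 = if j = k then v else r.getD j 0 := by
  simp only [List.getD, List.getElem?_set]
  by_cases h : j = k
  · simp [h, hk]
  · have h' : ¬ k = j := fun e => h e.symm
    simp [h, h']

-- pass-1 invariant
lemma passOne (c : List Int) (k : Nat) (hk : k ≤ c.length) :
    ((PySem.List.pyRange 1 (k : Int) 1).foldl (fun r i =>
        if PySem.List.pyGetD c i 0 > PySem.List.pyGetD c (i - 1) 0 then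
          PySem.List.pySetD r i (PySem.List.pyGetD r (i - 1) 0 + 1)
        else r) (List.replicate c.length (1 : Int))).length = c.length ∧
      (∀ j : Nat, j < c.length →
        ((PySem.List.pyRange 1 (k : Int) 1).foldl (fun r i =>
          if PySem.List.pyGetD c i 0 > PySem.List.pyGetD c (i - 1) 0 then
            PySem.List.pySetD r i (PySem.List.pyGetD r (i - 1) 0 + 1)
          else r) (List.replicate c.length (1 : Int))).getD j 0 = if j < k then upF c j else 1) := by
  induction k with
  | zero =>
    rw [PySem.List.pyRange_one_eq_nil (by omega)]
    simp only [List.foldl_nil, List.length_replicate, true_and]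
    intro j hj
    rw [List.getD_eq_getElem _ _ (by simpa using hj)]
    simp
  | succ k ih =>
    cases k with
    | zero =>
      rw [PySem.List.pyRange_one_eq_nil (by omega)]
      simp only [List.foldl_nil, List.length_replicate, true_and]
      intro j hj
      rw [List.getD_eq_getElem _ _ (by simpa using hj)]
      cases j <;> simp [upF]
    | succ m =>
      obtain ⟨hlen, hinv⟩ := ih (by omega)
      have hb : ((m + 2 : Nat) : Int) = ((m + 1 : Nat) : Int) + 1 := by push_cast; ring
      rw [hb, PySem.List.pyRange_one_succ_right (by push_cast; omega)]
      simp only [List.foldl_append, List.foldl_cons, List.foldl_nil]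
      have hsub : (((m + 1 : Nat) : Int) - 1) = ((m : Nat) : Int) := by push_cast; ring
      simp only [hsub, PySem.List.pyGetD_natCast, PySem.List.pySetD_natCast]
      have hm1 : m + 1 < c.length := by omega
      have hm : m < c.length := by omega
      have hup : upF c (m + 1) =
          if c.getD (m + 1) 0 > c.getD m 0 then upF c m + 1 else 1 := rfl
      set r := (PySem.List.pyRange 1 ((m + 1 : Nat) : Int) 1).foldl (fun r i =>
          if PySem.List.pyGetD c i 0 > PySem.List.pyGetD c (i - 1) 0 then
            PySem.List.pySetD r i (PySem.List.pyGetD r (i - 1) 0 + 1)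
          else r) (List.replicate c.length (1 : Int)) with hr
      have hrm : r.getD m 0 = upF c m := by
        rw [hinv m hm]; simp
      have hrlen : r.length = c.length := by rw [hr]; exact hlen
      split_ifs with hc
      · refine ⟨by rw [List.length_set]; exact hrlen, ?_⟩
        intro j hj
        rw [getD_set r (m + 1) j _ (by omega)]
        by_cases hjm : j = m + 1
        · subst hjm
          simp only [if_pos (Nat.lt_succ_self (m + 1))]
          rw [hup, if_pos hc, hrm]
          simp
        · rw [if_neg hjm, hinv j hj]
          by_cases hlt : j < m + 1
          · rw [if_pos hlt, if_pos (by omega)]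
          · rw [if_neg hlt, if_neg (by omega)]
      · refine ⟨hrlen, ?_⟩
        intro j hj
        rw [hinv j hj]
        by_cases hjm : j = m + 1
        · subst hjm
          rw [if_neg (by omega), if_pos (by omega), hup, if_neg hc]
        · by_cases hlt : j < m + 1
          · rw [if_pos hlt, if_pos (by omega)]
          · rw [if_neg hlt, if_neg (by omega)]

-- pass-2 invariant (downward scan, counted by m = a + 1)
lemma passTwo (c : List Int) (m : Nat) (hm : (m : Int) ≤ (c.length : Int) - 1) :
    ∀ r : List Int, r.length = c.length →
    (∀ j : Nat, j < c.length →
        r.getD j 0 = if j < m then upF c j else max (upF c j) (downF c j)) →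
    ∀ j : Nat, j < c.length →
      ((PySem.List.pyRange ((m : Int) - 1) (-1) (-1)).foldl (fun r i =>
        if PySem.List.pyGetD c i 0 > PySem.List.pyGetD c (i + 1) 0 then
          PySem.List.pySetD r i (max (PySem.List.pyGetD r i 0) (PySem.List.pyGetD r (i + 1) 0 + 1))
        else r) r).getD j 0 = max (upF c j) (downF c j) := by
  induction m with
  | zero =>
    intro r hlen hinv j hj
    rw [PySem.List.pyRange_neg_one_eq_nil (by omega), List.foldl_nil]
    simpa using hinv j hj
  | succ m ih =>
    intro r hlen hinv j hj
    have hm1 : m < c.length := by omega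
    have hm2 : m + 1 < c.length := by omega
    have hc1 : ((m + 1 : Nat) : Int) - 1 = ((m : Nat) : Int) := by push_cast; ring
    rw [hc1, PySem.List.pyRange_neg_one_cons (by omega), List.foldl_cons]
    have hcast : ((m : Nat) : Int) + 1 = ((m + 1 : Nat) : Int) := by push_cast; ring
    simp only [hcast, PySem.List.pyGetD_natCast, PySem.List.pySetD_natCast]
    have hrm : r.getD m 0 = upF c m := by
      rw [hinv m hm1, if_pos (Nat.lt_succ_self m)]
    have hrm1 : r.getD (m + 1) 0 = max (upF c (m + 1)) (downF c (m + 1)) := by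
      rw [hinv (m + 1) hm2, if_neg (lt_irrefl (m + 1))]
    have hup1 : upF c (m + 1) =
        if c.getD (m + 1) 0 > c.getD m 0 then upF c m + 1 else 1 := rfl
    split_ifs with hcnd
    · refine ih (by omega) _ (by rw [List.length_set]; exact hlen) ?_ j hj
      intro j' hj'
      rw [getD_set _ m j' _ (by omega)]
      by_cases hjm : j' = m
      · rw [hjm]
        rw [if_pos rfl, if_neg (lt_irrefl m), hrm, hrm1]
        have hu1 : upF c (m + 1) = 1 := by rw [hup1, if_neg (by omega)]
        have hdm : downF c m = downF c (m + 1) + 1 := by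
          rw [downF, dif_pos hm2, if_pos hcnd]
        rw [hu1, hdm, max_eq_right (downF_pos c (m + 1))]
      · rw [if_neg hjm, hinv j' hj']
        by_cases hlt : j' < m
        · rw [if_pos hlt, if_pos (by omega)]
        · rw [if_neg hlt, if_neg (by omega)]
    · refine ih (by omega) r hlen ?_ j hj
      intro j' hj'
      rw [hinv j' hj']
      by_cases hjm : j' = m
      · rw [hjm]
        rw [if_pos (Nat.lt_succ_self m), if_neg (lt_irrefl m)]
        have hd : downF c m = 1 := by rw [downF, dif_pos hm2, if_neg hcnd]
        rw [hd, max_eq_left (upF_pos c m)]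
      · by_cases hlt : j' < m
        · rw [if_pos hlt, if_pos (by omega)]
        · rw [if_neg hlt, if_neg (by omega)]

lemma passTwo_length (c : List Int) (l : List Int) (r : List Int) :
    ((l.foldl (fun r i =>
        if PySem.List.pyGetD c i 0 > PySem.List.pyGetD c (i + 1) 0 then
          PySem.List.pySetD r i (max (PySem.List.pyGetD r i 0) (PySem.List.pyGetD r (i + 1) 0 + 1))
        else r) r).length = r.length) := by
  induction l generalizing r with
  | nil => rfl
  | cons a l ihl =>
    rw [List.foldl_cons, ihl]
    split_ifs
    · simp [PySem.List.length_pySetD]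
    · rfl

lemma bonuses_getD (c : List Int) :
    (bonuses c).length = c.length ∧
    ∀ j : Nat, j < c.length → (bonuses c).getD j 0 = max (upF c j) (downF c j) := by
  have hb : bonuses c = (PySem.List.pyRange ((c.length : Int) - 2) (-1) (-1)).foldl (fun r i =>
      if PySem.List.pyGetD c i 0 > PySem.List.pyGetD c (i + 1) 0 then
        PySem.List.pySetD r i (max (PySem.List.pyGetD r i 0) (PySem.List.pyGetD r (i + 1) 0 + 1))
      else r) ((PySem.List.pyRange 1 (c.length : Int) 1).foldl (fun r i =>
      if PySem.List.pyGetD c i 0 > PySem.List.pyGetD c (i - 1) 0 then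
        PySem.List.pySetD r i (PySem.List.pyGetD r (i - 1) 0 + 1)
      else r) (List.replicate c.length (1 : Int))) := rfl
  rw [hb]
  obtain ⟨h1len, h1inv⟩ := passOne c c.length le_rfl
  rcases Nat.eq_zero_or_pos c.length with h0 | hpos
  · constructor
    · rw [passTwo_length, h1len]
    · intro j hj; omega
  · have hcast : ((c.length - 1 : Nat) : Int) - 1 = (c.length : Int) - 2 := by omega
    constructor
    · rw [passTwo_length, h1len]
    · intro j hj
      rw [← hcast]
      refine passTwo c (c.length - 1) (by omega) _ h1len ?_ j hj
      intro j' hj'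
      rw [h1inv j' hj', if_pos hj']
      by_cases hlt : j' < c.length - 1
      · rw [if_pos hlt]
      · rw [if_neg hlt]
        have hj'e : j' = c.length - 1 := by omega
        have hd : downF c j' = 1 := by rw [downF, dif_neg (by omega)]
        rw [hd]
        exact (max_eq_left (upF_pos c j')).symm

-- ===== B-side lemmas =====

-- fuel irrelevance: any fuel covering the remaining indices computes the same run end
lemma findUpF_congr (c : List Int) : ∀ (f1 f2 j : Nat), c.length ≤ j + f1 → c.length ≤ j + f2 →
    findUpF c f1 j = findUpF c f2 j := by
  intro f1
  induction f1 with
  | zero =>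
    intro f2 j h1 h2
    cases f2 with
    | zero => rfl
    | succ f2 =>
      show j = if j + 1 < c.length ∧ c.getD (j + 1) 0 > c.getD j 0 then findUpF c f2 (j + 1) else j
      rw [if_neg (fun hb => absurd hb.1 (by omega))]
  | succ f1 ih =>
    intro f2 j h1 h2
    cases f2 with
    | zero =>
      show (if j + 1 < c.length ∧ c.getD (j + 1) 0 > c.getD j 0 then findUpF c f1 (j + 1) else j) = j
      rw [if_neg (fun hb => absurd hb.1 (by omega))]
    | succ f2 =>
      show (if j + 1 < c.length ∧ c.getD (j + 1) 0 > c.getD j 0 then findUpF c f1 (j + 1) else j)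
         = if j + 1 < c.length ∧ c.getD (j + 1) 0 > c.getD j 0 then findUpF c f2 (j + 1) else j
      by_cases hc : j + 1 < c.length ∧ c.getD (j + 1) 0 > c.getD j 0
      · rw [if_pos hc, if_pos hc]
        exact ih f2 (j + 1) (by omega) (by omega)
      · rw [if_neg hc, if_neg hc]

lemma findUp_eq (c : List Int) (j : Nat) :
    findUp c j = if j + 1 < c.length ∧ c.getD (j + 1) 0 > c.getD j 0
      then findUp c (j + 1) else j := by
  unfold findUp
  rcases Nat.eq_zero_or_pos (c.length - j) with h0 | hp
  · rw [h0]
    show j = if j + 1 < c.length ∧ c.getD (j + 1) 0 > c.getD j 0 then findUpF c (c.length - (j + 1)) (j + 1) else j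
    rw [if_neg (fun hb => absurd hb.1 (by omega))]
  · obtain ⟨f, hf⟩ : ∃ f, c.length - j = f + 1 := ⟨c.length - j - 1, by omega⟩
    rw [hf]
    show (if j + 1 < c.length ∧ c.getD (j + 1) 0 > c.getD j 0 then findUpF c f (j + 1) else j)
       = if j + 1 < c.length ∧ c.getD (j + 1) 0 > c.getD j 0 then findUpF c (c.length - (j + 1)) (j + 1) else j
    by_cases hc : j + 1 < c.length ∧ c.getD (j + 1) 0 > c.getD j 0
    · rw [if_pos hc, if_pos hc]
      exact findUpF_congr c f (c.length - (j + 1)) (j + 1) (by omega) (by omega)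
    · rw [if_neg hc, if_neg hc]

lemma findDownF_congr (c : List Int) : ∀ (f1 f2 j : Nat), c.length ≤ j + f1 → c.length ≤ j + f2 →
    findDownF c f1 j = findDownF c f2 j := by
  intro f1
  induction f1 with
  | zero =>
    intro f2 j h1 h2
    cases f2 with
    | zero => rfl
    | succ f2 =>
      show j = if j + 1 < c.length ∧ c.getD (j + 1) 0 < c.getD j 0 then findDownF c f2 (j + 1) else j
      rw [if_neg (fun hb => absurd hb.1 (by omega))]
  | succ f1 ih =>
    intro f2 j h1 h2
    cases f2 with
    | zero =>
      show (if j + 1 < c.length ∧ c.getD (j + 1) 0 < c.getD j 0 then findDownF c f1 (j + 1) else j) = j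
      rw [if_neg (fun hb => absurd hb.1 (by omega))]
    | succ f2 =>
      show (if j + 1 < c.length ∧ c.getD (j + 1) 0 < c.getD j 0 then findDownF c f1 (j + 1) else j)
         = if j + 1 < c.length ∧ c.getD (j + 1) 0 < c.getD j 0 then findDownF c f2 (j + 1) else j
      by_cases hc : j + 1 < c.length ∧ c.getD (j + 1) 0 < c.getD j 0
      · rw [if_pos hc, if_pos hc]
        exact ih f2 (j + 1) (by omega) (by omega)
      · rw [if_neg hc, if_neg hc]

lemma findDown_eq (c : List Int) (j : Nat) :
    findDown c j = if j + 1 < c.length ∧ c.getD (j + 1) 0 < c.getD j 0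
      then findDown c (j + 1) else j := by
  unfold findDown
  rcases Nat.eq_zero_or_pos (c.length - j) with h0 | hp
  · rw [h0]
    show j = if j + 1 < c.length ∧ c.getD (j + 1) 0 < c.getD j 0 then findDownF c (c.length - (j + 1)) (j + 1) else j
    rw [if_neg (fun hb => absurd hb.1 (by omega))]
  · obtain ⟨f, hf⟩ : ∃ f, c.length - j = f + 1 := ⟨c.length - j - 1, by omega⟩
    rw [hf]
    show (if j + 1 < c.length ∧ c.getD (j + 1) 0 < c.getD j 0 then findDownF c f (j + 1) else j)
       = if j + 1 < c.length ∧ c.getD (j + 1) 0 < c.getD j 0 then findDownF c (c.length - (j + 1)) (j + 1) else j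
    by_cases hc : j + 1 < c.length ∧ c.getD (j + 1) 0 < c.getD j 0
    · rw [if_pos hc, if_pos hc]
      exact findDownF_congr c f (c.length - (j + 1)) (j + 1) (by omega) (by omega)
    · rw [if_neg hc, if_neg hc]

lemma le_findUp (c : List Int) (j : Nat) : j ≤ findUp c j := by
  rw [findUp_eq]
  split
  · have := le_findUp c (j + 1); omega
  · exact le_rfl
termination_by c.length - j
decreasing_by rename_i h; omega

lemma le_findDown (c : List Int) (j : Nat) : j ≤ findDown c j := by
  rw [findDown_eq]
  split
  · have := le_findDown c (j + 1); omega
  · exact le_rfl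
termination_by c.length - j
decreasing_by rename_i h; omega


lemma findUp_lt (c : List Int) (j : Nat) (h : j < c.length) : findUp c j < c.length := by
  rw [findUp_eq]
  split
  · rename_i h'; exact findUp_lt c (j + 1) h'.1
  · exact h
termination_by c.length - j
decreasing_by omega

lemma findDown_lt (c : List Int) (j : Nat) (h : j < c.length) : findDown c j < c.length := by
  rw [findDown_eq]
  split
  · rename_i h'; exact findDown_lt c (j + 1) h'.1
  · exact h
termination_by c.length - j
decreasing_by omega

lemma findUp_incr (c : List Int) (j p : Nat) (h1 : j ≤ p) (h2 : p < findUp c j) :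
    c.getD p 0 < c.getD (p + 1) 0 := by
  rw [findUp_eq] at h2
  split at h2
  · rename_i h'
    by_cases hp : j = p
    · subst hp; exact h'.2
    · exact findUp_incr c (j + 1) p (by omega) h2
  · omega
termination_by c.length - j
decreasing_by omega

lemma findUp_stop (c : List Int) (j : Nat) :
    ¬ (findUp c j + 1 < c.length ∧ c.getD (findUp c j + 1) 0 > c.getD (findUp c j) 0) := by
  rw [findUp_eq]
  split
  · exact findUp_stop c (j + 1)
  · rename_i h'; exact h'
termination_by c.length - j
decreasing_by omega

lemma findDown_decr (c : List Int) (j p : Nat) (h1 : j ≤ p) (h2 : p < findDown c j) :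
    c.getD (p + 1) 0 < c.getD p 0 := by
  rw [findDown_eq] at h2
  split at h2
  · rename_i h'
    by_cases hp : j = p
    · subst hp; exact h'.2
    · exact findDown_decr c (j + 1) p (by omega) h2
  · omega
termination_by c.length - j
decreasing_by omega

lemma findDown_stop (c : List Int) (j : Nat) :
    ¬ (findDown c j + 1 < c.length ∧ c.getD (findDown c j + 1) 0 < c.getD (findDown c j) 0) := by
  rw [findDown_eq]
  split
  · exact findDown_stop c (j + 1)
  · rename_i h'; exact h'
termination_by c.length - j
decreasing_by omega

-- upF along a strictly increasing run
lemma upF_run (c : List Int) (i : Nat) (hstart : upF c i = 1) (p : Nat)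
    (h1 : i ≤ p) (h2 : p ≤ findUp c i) : upF c p = ((p - i : Nat) : Int) + 1 := by
  induction p with
  | zero =>
    have : i = 0 := by omega
    subst this; simpa using hstart
  | succ p ih =>
    by_cases hip : i = p + 1
    · subst hip; simpa using hstart
    · have hp1 : i ≤ p := by omega
      have hp2 : p < findUp c i := by omega
      have hincr := findUp_incr c i p hp1 hp2
      have : upF c (p + 1) = upF c p + 1 := by
        rw [show upF c (p + 1) =
          if c.getD (p + 1) 0 > c.getD p 0 then upF c p + 1 else 1 from rfl, if_pos hincr]
      rw [this, ih hp1 (le_of_lt hp2)]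
      omega

-- downF inside an increasing run is 1
lemma downF_of_incr (c : List Int) (p : Nat) (h : c.getD p 0 < c.getD (p + 1) 0) :
    downF c p = 1 := by
  rw [downF]
  split
  · rw [if_neg (by omega)]
  · rfl

-- upF right after a strict descent (or non-ascent) is 1
lemma upF_succ_of_not_lt (c : List Int) (p : Nat) (h : ¬ c.getD p 0 < c.getD (p + 1) 0) :
    upF c (p + 1) = 1 := by
  rw [show upF c (p + 1) =
    if c.getD (p + 1) 0 > c.getD p 0 then upF c p + 1 else 1 from rfl, if_neg (by omega)]

-- downF along a strictly decreasing run, measured from its end k = findDown c j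
lemma downF_run (c : List Int) (j : Nat) (hj : j < c.length) (p : Nat)
    (h1 : j ≤ p) (h2 : p ≤ findDown c j) :
    downF c p = ((findDown c j - p : Nat) : Int) + 1 := by
  by_cases hp : p = findDown c j
  · subst hp
    have hstop := findDown_stop c j
    rw [downF]
    split
    · rename_i hlt
      rw [if_neg (fun hb => hstop ⟨hlt, hb⟩)]
      simp
    · simp
  · have hlt : p < findDown c j := by omega
    have hd := findDown_decr c j p h1 hlt
    have hkl := findDown_lt c j hj
    rw [downF, dif_pos (by omega), if_pos (by omega),
        downF_run c j hj (p + 1) (by omega) (by omega)]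
    omega
termination_by findDown c j - p
decreasing_by omega

-- the segment emitted for a run [i, j] ↑ then [j, k] ↓ lists max(upF,downF) at positions i..k
lemma seg_eq (c : List Int) (i : Nat) (hi : i < c.length) (hstart : upF c i = 1) :
    PySem.List.pyRange 1 ((findUp c i : Int) - (i : Int) + 1) 1
      ++ [max ((findUp c i : Int) - (i : Int) + 1) ((findDown c (findUp c i) : Int) - (findUp c i : Int) + 1)]
      ++ PySem.List.pyRange ((findDown c (findUp c i) : Int) - (findUp c i : Int) + 1 - 1) 0 (-1)
    = (List.range (findDown c (findUp c i) - i + 1)).map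
        (fun t => max (upF c (i + t)) (downF c (i + t))) := by
  set j := findUp c i with hjdef
  set k := findDown c j with hkdef
  have hij : i ≤ j := le_findUp c i
  have hjk : j ≤ k := le_findDown c j
  have hjl : j < c.length := findUp_lt c i hi
  have hkl : k < c.length := findDown_lt c j hjl
  have hup : ∀ p, i ≤ p → p ≤ j → upF c p = ((p - i : Nat) : Int) + 1 :=
    fun p h1 h2 => upF_run c i hstart p h1 h2
  have hdown : ∀ p, j ≤ p → p ≤ k → downF c p = ((k - p : Nat) : Int) + 1 :=
    fun p h1 h2 => downF_run c j hjl p h1 h2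
  have hd1 : ∀ p, i ≤ p → p < j → downF c p = 1 :=
    fun p h1 h2 => downF_of_incr c p (findUp_incr c i p h1 h2)
  have hu1 : ∀ p, j < p → p ≤ k → upF c p = 1 := by
    intro p h1 h2
    obtain ⟨q, rfl⟩ : ∃ q, p = q + 1 := ⟨p - 1, by omega⟩
    have := findDown_decr c j q (by omega) (by omega)
    exact upF_succ_of_not_lt c q (by omega)
  rw [PySem.List.pyRange_one, PySem.List.pyRange_neg_one]
  have e1 : (((j : Int) - (i : Int) + 1) - 1).toNat = j - i := by omega
  have e2 : (((k : Int) - (j : Int) + 1 - 1) - 0).toNat = k - j := by omega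
  rw [e1, e2]
  have hn : k - i + 1 = (j - i) + (1 + (k - j)) := by omega
  rw [hn, List.range_add, List.range_add]
  simp only [List.map_append, List.map_map, List.range_one, List.map_cons,
    List.singleton_append, Function.comp_def]
  rw [List.append_assoc]
  congr 1
  · apply List.map_congr_left
    intro t ht
    rw [List.mem_range] at ht
    rw [hup (i + t) (by omega) (by omega), hd1 (i + t) (by omega) (by omega)]
    rw [max_eq_left (by omega)]
    omega
  · simp only [List.singleton_append]
    congr 1
    · have h0 : i + (j - i + 0) = j := by omega
      rw [h0, hup j hij le_rfl, hdown j le_rfl hjk]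
      congr 2 <;> omega
    · apply List.map_congr_left
      intro t ht
      rw [List.mem_range] at ht
      have hp : i + (j - i + (1 + t)) = j + 1 + t := by omega
      have htk : j + 1 + t ≤ k := by omega
      rw [hp, hu1 (j + 1 + t) (by omega) htk, hdown (j + 1 + t) (by omega) htk]
      rw [max_eq_right (by omega)]
      omega

lemma segLoop_inv (c : List Int) (m : Nat) : ∀ (i : Nat) (res : List Int),
    c.length < i + m →
    res = (List.range res.length).map (fun p => max (upF c p) (downF c p)) →
    (res.length = i ∨ res.length = i + 1) →
    res.length ≤ c.length →
    (c.length ≤ i → res.length = c.length) →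
    (i < c.length → upF c i = 1) →
    segLoopF c m i res = (List.range c.length).map (fun p => max (upF c p) (downF c p)) := by
  induction m with
  | zero =>
    intro i res hm hres hlen hle hend _
    show res = _
    have : res.length = c.length := hend (by omega)
    rw [hres, this]
  | succ m ih =>
    intro i res hm hres hlen hle hend hstart
    have hunf : segLoopF c (m + 1) i res =
        if i < c.length then
          segLoopF c m
            (if findDown c (findUp c i) > findUp c i then findDown c (findUp c i)
             else findDown c (findUp c i) + 1)
            (res ++ PySem.List.slice
              (PySem.List.pyRange 1 ((findUp c i : Int) - (i : Int) + 1) 1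
                ++ [max ((findUp c i : Int) - (i : Int) + 1)
                      ((findDown c (findUp c i) : Int) - (findUp c i : Int) + 1)]
                ++ PySem.List.pyRange
                    ((findDown c (findUp c i) : Int) - (findUp c i : Int) + 1 - 1) 0 (-1))
              (some ((res.length : Int) - (i : Int))) none)
        else res := rfl
    rw [hunf]
    split
    · rename_i hi
      set j := findUp c i with hjdef
      set k := findDown c j with hkdef
      have hij : i ≤ j := le_findUp c i
      have hjk : j ≤ k := le_findDown c j
      have hjl : j < c.length := findUp_lt c i hi
      have hkl : k < c.length := findDown_lt c j hjl
      have hseg := seg_eq c i hi (hstart hi)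
      rw [← hjdef, ← hkdef] at hseg
      set S := fun p => max (upF c p) (downF c p) with hS
      set seg := PySem.List.pyRange 1 ((j : Int) - (i : Int) + 1) 1
          ++ [max ((j : Int) - (i : Int) + 1) ((k : Int) - (j : Int) + 1)]
          ++ PySem.List.pyRange ((k : Int) - (j : Int) + 1 - 1) 0 (-1) with hsegdef
      have hsegv : seg = (List.range (k - i + 1)).map (fun t => S (i + t)) := hseg
      -- the slice start is a natural number d = res.length - i ∈ {0,1}
      obtain ⟨d, hd, hdval⟩ : ∃ d : Nat, res.length = i + d ∧ d ≤ 1 := by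
        rcases hlen with h | h
        · exact ⟨0, by omega, by omega⟩
        · exact ⟨1, by omega, by omega⟩
      have hcast : (res.length : Int) - (i : Int) = ((d : Nat) : Int) := by omega
      rw [hcast, PySem.List.slice_from_natCast]
      have hres' : res ++ seg.drop d
          = (List.range (k + 1)).map S := by
        apply List.ext_getElem
        · simp [hsegv]; omega
        · intro q hq1 hq2
          simp only [List.length_map, List.length_range] at hq2
          simp only [List.getElem_map, List.getElem_range]
          by_cases hql : q < res.length
          · rw [List.getElem_append_left hql, List.getElem_of_eq hres hql]
            simp only [List.getElem_map, List.getElem_range]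
          · rw [List.getElem_append_right (by omega), List.getElem_drop,
              List.getElem_of_eq hsegv (by simp [hsegv]; omega)]
            simp only [List.getElem_map, List.getElem_range]
            congr 1
            omega
      rw [hres']
      refine ih _ _ (by split <;> omega) ?_ (by split <;> simp) (by simp; omega)
        (by intro h
            split at h
            · exact absurd h (by omega)
            · simp; omega) ?_
      · simp
      · intro hnext
        split at hnext
        · rename_i hkj
          -- next i = k, k > j: the previous step was a strict descent
          rw [if_pos hkj]
          have hdec := findDown_decr c j (k - 1) (by omega) (by omega)
          have h1 := upF_succ_of_not_lt c (k - 1) (by omega)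
          rwa [show k - 1 + 1 = k by omega] at h1
        · rename_i hkj
          -- next i = k + 1 = j + 1: the up-run stopped, so no ascent into k+1
          rw [if_neg hkj]
          have hkje : k = j := by omega
          have hstop := findUp_stop c i
          rw [← hjdef] at hstop
          refine upF_succ_of_not_lt c k ?_
          rw [hkje]
          exact fun hb => hstop ⟨by omega, hb⟩
    · have : res.length = c.length := hend (by omega)
      rw [hres, this]

lemma bonuses_alt_getD (c : List Int) :
    bonuses_alt c = (List.range c.length).map (fun p => max (upF c p) (downF c p)) := by
  refine segLoop_inv c (c.length + 1) 0 [] (by omega) (by simp) (by simp) (by simp) ?_ ?_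
  · intro h; simp; omega
  · intro h; cases c with
    | nil => simp at h
    | cons a l => simp [upF]

-- ===== VERDICT (by name: the statement is the Claim_ definition above) =====
theorem bonuses_spec : Claim_equal_bonuses := by
  intro coders _
  unfold Spec_bonuses
  obtain ⟨hl1, hp1⟩ := bonuses_getD coders
  have h2 := bonuses_alt_getD coders
  apply List.ext_getElem (by simp [h2, hl1])
  intro q hq1 hq2
  have e1 := hp1 q (by omega)
  rw [List.getD_eq_getElem _ _ hq1] at e1
  rw [e1, List.getElem_of_eq h2 hq2]
  simp
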